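-- pv_equiv track=rewrite | github.com/catalyst-cooperative/eel-hole | tests/relevancy/test_relevancy.py | _compute_relevant_ranks
-- ===== SOURCE A (Python) =====
-- def _compute_relevant_ranks(result_names, relevant_names):
--     """Given the actual results and expected relevant results, compute the ranks of the relevant results."""
--     ranks = {}
--     unseen_relevant = set(relevant_names)
--     for i, name in enumerate(result_names):
--         if name in unseen_relevant:
--             ranks[name] = i + 1
--             unseen_relevant.remove(name)
--     return ranks
-- ===== SOURCE B (Python) =====
-- def _first_positions(result_names):
--     """Map each result name to the index of its first occurrence (reversed, so earlier writes win)."""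
--     return {name: i for i, name in reversed(list(enumerate(result_names)))}
--
--
-- def _compute_relevant_ranks(result_names, relevant_names):
--     """Given the actual results and expected relevant results, compute the ranks of the relevant results."""
--     first_pos = _first_positions(result_names)
--     hits = [(first_pos[name], name) for name in set(relevant_names) if name in first_pos]
--     hits.sort(key=lambda hit: hit[0])
--     return {name: idx + 1 for idx, name in hits}
-- ===== Notes on version B (the rewrite author's own statement) =====
-- stated objective: alternative
-- what changed: Replaces A's single stateful pass over result_names (ranks dict plus a shrinking 'unseen' set) by building a first-occurrence position map from reversed(enumerate(result_names)), looking each deduplicated relevant name up in it, and sorting the hits by position to build the same name-to-rank dict.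
import Mathlib
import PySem

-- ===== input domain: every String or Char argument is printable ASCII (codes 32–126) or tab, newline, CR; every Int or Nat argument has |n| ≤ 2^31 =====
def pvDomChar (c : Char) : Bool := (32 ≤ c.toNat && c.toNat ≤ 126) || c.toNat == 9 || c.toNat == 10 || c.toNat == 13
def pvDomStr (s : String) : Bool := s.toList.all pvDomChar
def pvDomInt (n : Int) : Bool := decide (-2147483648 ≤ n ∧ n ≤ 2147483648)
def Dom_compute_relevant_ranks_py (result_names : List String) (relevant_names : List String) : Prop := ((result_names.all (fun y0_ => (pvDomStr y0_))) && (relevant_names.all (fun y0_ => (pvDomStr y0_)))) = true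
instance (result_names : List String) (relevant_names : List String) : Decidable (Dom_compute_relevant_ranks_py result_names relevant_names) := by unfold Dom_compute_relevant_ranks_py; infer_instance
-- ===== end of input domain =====

-- B replaces A's single stateful pass (ranks dict + shrinking 'unseen' set) by a first-occurrence
-- position map, lookups for the deduplicated relevant names, and a sort on the position (objective: alternative).

-- ===== PORT A =====
-- one pass over enumerate(result_names) carrying (ranks dict, unseen set);
-- 'unseen_relevant.remove(name)' is guarded by the membership test, so it equals Set.discard here
def compute_relevant_ranks_py (result_names : List String) (relevant_names : List String) : List (String × Int) :=
  let st := (PySem.List.enumerate result_names 0).foldl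
    (fun (st : PySem.Dict String Int × PySem.Set String) p =>
      if PySem.Set.contains st.2 p.2 then
        (st.1.insert p.2 (p.1 + 1), PySem.Set.discard st.2 p.2)
      else st)
    (PySem.Dict.empty, PySem.Set.ofList relevant_names)
  st.1.items

-- ===== PORT B =====
-- _first_positions: the dict comprehension over reversed(list(enumerate(result_names)))
def pvFirstPos (result_names : List String) : PySem.Dict String Int :=
  ((PySem.List.enumerate result_names 0).reverse).foldl
    (fun (d : PySem.Dict String Int) p => d.insert p.2 p.1) PySem.Dict.empty

-- the hits comprehension over set(relevant_names) (result invariant under that set's order: the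
-- subsequent sort on pairwise-distinct first indices determines the order); 'first_pos[name]' is
-- guarded by the membership test, so it is Dict.getD here; the final dict comprehension's keys
-- are distinct names, so it is a plain map over hits
def compute_relevant_ranks_py_alt (result_names : List String) (relevant_names : List String) : List (String × Int) :=
  let first_pos := pvFirstPos result_names
  let hits := ((PySem.Set.ofList relevant_names).filter
      (fun name => first_pos.contains name)).map
      (fun name => (first_pos.getD name 0, name))
  let sortedHits := PySem.List.sorted hits (fun hit => hit.1) false
  sortedHits.map (fun hit => (hit.2, hit.1 + 1))

-- ===== PRECONDITION & SPEC =====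
def Spec_compute_relevant_ranks_py (result_names : List String) (relevant_names : List String) (out : List (String × Int)) : Prop := out = compute_relevant_ranks_py_alt result_names relevant_names
instance (result_names : List String) (relevant_names : List String) (out : List (String × Int)) : Decidable (Spec_compute_relevant_ranks_py result_names relevant_names out) := by unfold Spec_compute_relevant_ranks_py; infer_instance

-- ===== CLAIM (what is proved, stated in full; the proofs are below) =====
def Claim_equal_compute_relevant_ranks_py : Prop := ∀ (result_names : List String) (relevant_names : List String), Dom_compute_relevant_ranks_py result_names relevant_names → Spec_compute_relevant_ranks_py result_names relevant_names (compute_relevant_ranks_py result_names relevant_names)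

-- ===== LEMMAS AND PROOFS =====
-- the pairs (first index, name) that A's loop selects, in result order
def pvSel (l : List String) (u : List String) (s : Int) : List (Int × String) :=
  match l with
  | [] => []
  | x :: t =>
    if PySem.Set.contains u x then (s, x) :: pvSel t (PySem.Set.discard u x) (s + 1)
    else pvSel t u (s + 1)

lemma pvSel_loopA (l : List String) : ∀ (u : List String) (d : PySem.Dict String Int) (s : Int),
    (∀ x ∈ u, d.contains x = false) →
    ((PySem.List.enumerate l s).foldl
      (fun (st : PySem.Dict String Int × PySem.Set String) p =>
        if PySem.Set.contains st.2 p.2 then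
          (st.1.insert p.2 (p.1 + 1), PySem.Set.discard st.2 p.2)
        else st) (d, u)).1.items
    = d.items ++ (pvSel l u s).map (fun p => (p.2, p.1 + 1)) := by
  induction l with
  | nil => intro u d s _; simp [pvSel, PySem.List.enumerate_nil]
  | cons x t ih =>
    intro u d s hinv
    rw [PySem.List.enumerate_cons, List.foldl_cons]
    cases hx : PySem.Set.contains u x
    · have hxm' : x ∉ u := by simpa [PySem.Set.contains] using hx
      simp only [Bool.false_eq_true, if_false]
      rw [ih u d (s + 1) hinv]
      simp [pvSel, hxm']
    · have hxm : x ∈ u := by simpa [PySem.Set.contains] using hx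
      have hinv' : ∀ y ∈ PySem.Set.discard u x, (d.insert x (s + 1)).contains y = false := by
        intro y hy
        have hy' : y ∈ u ∧ y ≠ x := by
          simpa [PySem.Set.discard, List.mem_filter] using hy
        rw [PySem.Dict.contains_insert]
        simp [hy'.2, hinv y hy'.1]
      simp only [if_true]
      rw [ih (PySem.Set.discard u x) (d.insert x (s + 1)) (s + 1) hinv']
      rw [PySem.Dict.items_insert_of_not_contains d (s + 1) (hinv x hxm)]
      simp [pvSel, hxm]

lemma pvSel_lb (l : List String) : ∀ (u : List String) (s : Int),
    ∀ p ∈ pvSel l u s, s ≤ p.1 := by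
  induction l with
  | nil => intro u s p hp; simp [pvSel] at hp
  | cons x t ih =>
    intro u s p hp
    simp only [pvSel] at hp
    split at hp
    · rcases List.mem_cons.mp hp with h | h
      · subst h; simp
      · have := ih _ (s + 1) p h; omega
    · have := ih u (s + 1) p hp; omega

lemma pvSel_pairwise (l : List String) : ∀ (u : List String) (s : Int),
    (pvSel l u s).Pairwise (fun a b => a.1 < b.1) := by
  induction l with
  | nil => intro u s; simp [pvSel]
  | cons x t ih =>
    intro u s
    simp only [pvSel]
    split
    · exact List.Pairwise.cons
        (fun b hb => by have := pvSel_lb t _ (s + 1) b hb; simp; omega)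
        (ih _ (s + 1))
    · exact ih u (s + 1)

lemma pvSel_perm (l : List String) : ∀ (u : List String), u.Nodup → ∀ (s : Int),
    (pvSel l u s).Perm
      ((u.filter (fun n => l.contains n)).map
        (fun n => (s + (((PySem.List.index? l n).getD 0 : Nat) : Int), n))) := by
  induction l with
  | nil => intro u _ s; simp [pvSel]
  | cons x t ih =>
    intro u hu s
    cases hx : PySem.Set.contains u x
    · -- x is not a relevant name: the filtered list is unchanged, indices shift by one
      have hxm : x ∉ u := by simpa [PySem.Set.contains] using hx
      have hfil : u.filter (fun n => (x :: t).contains n) = u.filter (fun n => t.contains n) := by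
        apply List.filter_congr
        intro n hn
        have hnx : x ≠ n := fun h => hxm (h ▸ hn)
        simp [Ne.symm hnx]
      have hmap : (u.filter (fun n => t.contains n)).map
            (fun n => (s + (((PySem.List.index? (x :: t) n).getD 0 : Nat) : Int), n))
          = (u.filter (fun n => t.contains n)).map
            (fun n => ((s + 1) + (((PySem.List.index? t n).getD 0 : Nat) : Int), n)) := by
        apply List.map_congr_left
        intro n hn
        have hnt : n ∈ t := by
          have := (List.mem_filter.mp hn).2; simpa using this
        have hnx : x ≠ n := fun h => hxm (h ▸ (List.mem_filter.mp hn).1)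
        obtain ⟨k, hk⟩ := Option.isSome_iff_exists.mp ((PySem.List.index?_isSome_iff t n).mpr hnt)
        rw [PySem.List.index?_cons_of_ne t hnx, hk]
        simp only [Option.map_some, Option.getD_some, Prod.mk.injEq, and_true]
        push_cast; ring
      rw [hfil, hmap]
      simp only [pvSel, hx, Bool.false_eq_true, if_false]
      exact ih u hu (s + 1)
    · -- x is a still-unseen relevant name: it heads the selection with index 0
      have hxm : x ∈ u := by simpa [PySem.Set.contains] using hx
      have hue : PySem.Set.discard u x = u.erase x := by
        rw [List.Nodup.erase_eq_filter hu x]; simp [PySem.Set.discard, bne]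
      have hnd : (u.erase x).Nodup := hu.erase x
      have IH : (pvSel t (PySem.Set.discard u x) (s + 1)).Perm
          (((u.erase x).filter (fun n => t.contains n)).map
            (fun n => ((s + 1) + (((PySem.List.index? t n).getD 0 : Nat) : Int), n))) := by
        rw [hue]; exact ih (u.erase x) hnd (s + 1)
      -- rewrite the tail map into the (x :: t)-indexed form
      have hmap : ((u.erase x).filter (fun n => t.contains n)).map
            (fun n => ((s + 1) + (((PySem.List.index? t n).getD 0 : Nat) : Int), n))
          = ((u.erase x).filter (fun n => (x :: t).contains n)).map
            (fun n => (s + (((PySem.List.index? (x :: t) n).getD 0 : Nat) : Int), n)) := by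
        have hf : List.filter (fun n => (x :: t).contains n) (u.erase x)
            = List.filter (fun n => t.contains n) (u.erase x) := by
          apply List.filter_congr
          intro n hn
          have hnx : x ≠ n := fun h => ((hu.mem_erase_iff).mp hn).1 h.symm
          simp [Ne.symm hnx]
        rw [hf]
        symm
        apply List.map_congr_left
        intro n hn
        have hnt : n ∈ t := by
          have := (List.mem_filter.mp hn).2; simpa using this
        have hnx : x ≠ n := fun h => ((hu.mem_erase_iff).mp (List.mem_filter.mp hn).1).1 h.symm
        obtain ⟨k, hk⟩ := Option.isSome_iff_exists.mp ((PySem.List.index?_isSome_iff t n).mpr hnt)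
        rw [PySem.List.index?_cons_of_ne t hnx, hk]
        simp only [Option.map_some, Option.getD_some, Prod.mk.injEq, and_true]
        push_cast; ring
      have hfc : List.filter (fun n => (x :: t).contains n) (x :: u.erase x)
          = x :: List.filter (fun n => (x :: t).contains n) (u.erase x) := by
        rw [List.filter_cons_of_pos (by simp)]
      have hperm1 : ((u.filter (fun n => (x :: t).contains n)).map
            (fun n => (s + (((PySem.List.index? (x :: t) n).getD 0 : Nat) : Int), n))).Perm
          ((s, x) :: ((u.erase x).filter (fun n => (x :: t).contains n)).map
            (fun n => (s + (((PySem.List.index? (x :: t) n).getD 0 : Nat) : Int), n))) := by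
        have h := ((List.perm_cons_erase hxm).filter (fun n => (x :: t).contains n)).map
            (fun n => (s + (((PySem.List.index? (x :: t) n).getD 0 : Nat) : Int), n))
        rw [hfc, List.map_cons] at h
        simp only [PySem.List.index?_cons_self, Option.getD_some, Nat.cast_zero, add_zero] at h
        exact h
      simp only [pvSel, hx, if_true]
      exact ((IH.trans (by rw [hmap])).cons (s, x)).trans hperm1.symm

lemma pvFirstPos_cons (x : String) (t : List String) (s : Int) :
    ((PySem.List.enumerate (x :: t) s).reverse).foldl
      (fun (d : PySem.Dict String Int) p => d.insert p.2 p.1) PySem.Dict.empty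
    = (((PySem.List.enumerate t (s + 1)).reverse).foldl
        (fun (d : PySem.Dict String Int) p => d.insert p.2 p.1) PySem.Dict.empty).insert x s := by
  rw [PySem.List.enumerate_cons, List.reverse_cons, List.foldl_append]
  rfl

lemma pvFirstPos_get? (l : List String) : ∀ (s : Int) (n : String),
    (((PySem.List.enumerate l s).reverse).foldl
      (fun (d : PySem.Dict String Int) p => d.insert p.2 p.1) PySem.Dict.empty).get? n
    = (PySem.List.index? l n).map (fun k => s + (k : Int)) := by
  induction l with
  | nil => intro s n; simp [pysem, PySem.List.enumerate_nil]
  | cons x t ih =>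
    intro s n
    rw [pvFirstPos_cons]
    by_cases hn : n = x
    · subst hn
      rw [PySem.Dict.get?_insert_self, PySem.List.index?_cons_self]
      simp
    · rw [PySem.Dict.get?_insert_of_ne _ _ hn, ih (s + 1) n,
        PySem.List.index?_cons_of_ne t (fun h => hn h.symm)]
      cases PySem.List.index? t n
      · simp
      · simp
        ring

lemma pvFirstPos_contains (rs : List String) (n : String) :
    (pvFirstPos rs).contains n = rs.contains n := by
  rw [PySem.Dict.contains_eq_isSome_get?, pvFirstPos, pvFirstPos_get?]
  cases hc : PySem.List.index? rs n with
  | none =>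
    have : n ∉ rs := (PySem.List.index?_eq_none_iff rs n).mp hc
    simp [this]
  | some k =>
    have : n ∈ rs := (PySem.List.index?_isSome_iff rs n).mp (Option.isSome_iff_exists.mpr ⟨k, hc⟩)
    simp [this]

lemma pvFirstPos_getD (rs : List String) (n : String) (hn : n ∈ rs) :
    (pvFirstPos rs).getD n 0 = (((PySem.List.index? rs n).getD 0 : Nat) : Int) := by
  obtain ⟨k, hk⟩ := Option.isSome_iff_exists.mp ((PySem.List.index?_isSome_iff rs n).mpr hn)
  rw [PySem.Dict.getD_eq_get?_getD, pvFirstPos, pvFirstPos_get?, hk]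
  simp

-- ===== VERDICT (by name: the statement is the Claim_ definition above) =====
theorem compute_relevant_ranks_py_spec : Claim_equal_compute_relevant_ranks_py := by
  intro rs ns _
  unfold Spec_compute_relevant_ranks_py compute_relevant_ranks_py compute_relevant_ranks_py_alt
  have hhits : ((PySem.Set.ofList ns).filter (fun name => (pvFirstPos rs).contains name)).map
        (fun name => ((pvFirstPos rs).getD name 0, name))
      = ((PySem.Set.ofList ns).filter (fun name => rs.contains name)).map
        (fun name => ((((PySem.List.index? rs name).getD 0 : Nat) : Int), name)) := by
    rw [List.filter_congr (fun n _ => pvFirstPos_contains rs n)]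
    apply List.map_congr_left
    intro n hn
    have hn' : n ∈ rs := by
      have := (List.mem_filter.mp hn).2
      simpa using this
    rw [pvFirstPos_getD rs n hn']
  have hperm := pvSel_perm rs (PySem.Set.ofList ns) (PySem.Set.nodup_ofList ns) 0
  simp only [zero_add] at hperm
  have hsorted := PySem.List.sorted_eq_of_perm_of_pairwise_lt _ _
      (fun hit : Int × String => hit.1) hperm (pvSel_pairwise rs (PySem.Set.ofList ns) 0)
  rw [pvSel_loopA rs (PySem.Set.ofList ns) PySem.Dict.empty 0
      (fun x _ => PySem.Dict.contains_empty x)]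
  simp only [hhits, hsorted]
  rfl
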